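-- pv_equiv track=rewrite | github.com/cursiveinc/python | recorder/reconstructor_kraken.py | process_key_events
-- ===== SOURCE A (Python) =====
-- def process_key_events(events):
--     """
--     Process keydown events to extract text, handling backspaces and ignoring specified special keys.
--     """
--     text = []
--     ignore_keys = {'Enter', 'Shift', 'Control', 'Alt', 'Escape', 'ArrowUp', 'ArrowDown', 'ArrowRight','ArrowLeft', 'Delete'}  # Set of keys to ignore
--
--     for event in events:
--         key = event.get('key', '')
--
--         # Ignore specified keys
--         if key in ignore_keys:
--             continue
--
--         # Handle backspace
--         if key == 'Backspace':
--             if text: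
--                 text.pop()  # Remove the last character
--         # Add other characters
--         else:
--             text.append(key)
--
--     return ''.join(text)
-- ===== SOURCE B (Python) =====
-- def process_key_events(events):
--     """Reverse pass: count pending backspaces, keep characters that survive."""
--     ignore_keys = {'Enter', 'Shift', 'Control', 'Alt', 'Escape', 'ArrowUp', 'ArrowDown', 'ArrowRight', 'ArrowLeft', 'Delete'}
--     pending = 0
--     out = []
--     for event in reversed(events):
--         key = event.get('key', '')
--         if key in ignore_keys:
--             continue
--         if key == 'Backspace':
--             pending += 1
--         elif pending:
--             pending -= 1
--         else:
--             out.append(key)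
--     out.reverse()
--     return ''.join(out)
-- ===== Notes on version B (the rewrite author's own statement) =====
-- stated objective: alternative
-- what changed: Replaces the forward stack with pops by a single reverse-order pass that keeps a pending-backspace counter and collects surviving keys, reversing them at the end.
import Mathlib
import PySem

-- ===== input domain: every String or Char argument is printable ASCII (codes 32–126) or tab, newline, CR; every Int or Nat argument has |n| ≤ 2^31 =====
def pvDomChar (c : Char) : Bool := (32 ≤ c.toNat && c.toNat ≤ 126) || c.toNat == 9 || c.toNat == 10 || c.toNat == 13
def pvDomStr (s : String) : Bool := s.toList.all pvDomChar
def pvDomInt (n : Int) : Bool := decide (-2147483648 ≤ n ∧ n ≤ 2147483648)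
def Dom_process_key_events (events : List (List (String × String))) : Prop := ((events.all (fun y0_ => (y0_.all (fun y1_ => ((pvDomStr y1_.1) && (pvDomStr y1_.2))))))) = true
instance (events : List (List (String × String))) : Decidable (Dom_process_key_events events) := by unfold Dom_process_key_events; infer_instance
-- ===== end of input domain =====

-- B is an alternative single reverse pass with a pending-backspace counter instead of A's forward stack with pops.

-- ===== PORT A =====
def pvIgnoreKeys : List String :=
  ["Enter", "Shift", "Control", "Alt", "Escape", "ArrowUp", "ArrowDown", "ArrowRight", "ArrowLeft", "Delete"]

-- one iteration of A's forward loop over the stack `text`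
def pvAStep (text : List String) (event : List (String × String)) : List String :=
  let key := (PySem.Dict.mk event).getD "key" ""
  if key ∈ pvIgnoreKeys then text
  else if key = "Backspace" then (if text ≠ [] then text.dropLast else text)
  else text ++ [key]

def process_key_events (events : List (List (String × String))) : String :=
  PySem.Str.join "" (events.foldl pvAStep [])

-- ===== PORT B =====
-- B's reverse loop: pending backspace counter, surviving keys appended, reversed at the end
def pvBLoop : List (List (String × String)) → Nat → List String → List String
  | [], _, out => out
  | event :: rest, pending, out =>
    let key := (PySem.Dict.mk event).getD "key" ""
    if key ∈ pvIgnoreKeys then pvBLoop rest pending out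
    else if key = "Backspace" then pvBLoop rest (pending + 1) out
    else if pending ≠ 0 then pvBLoop rest (pending - 1) out
    else pvBLoop rest pending (out ++ [key])

def process_key_events_alt (events : List (List (String × String))) : String :=
  PySem.Str.join "" (pvBLoop events.reverse 0 []).reverse

-- ===== PRECONDITION & SPEC =====
def Spec_process_key_events (events : List (List (String × String))) (out : String) : Prop := out = process_key_events_alt events
instance (events : List (List (String × String))) (out : String) : Decidable (Spec_process_key_events events out) := by unfold Spec_process_key_events; infer_instance

-- ===== CLAIM (what is proved, stated in full; the proofs are below) =====
def Claim_equal_process_key_events : Prop := ∀ (events : List (List (String × String))), Dom_process_key_events events → Spec_process_key_events events (process_key_events events)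

-- ===== LEMMAS AND PROOFS =====

-- drop the last k elements, one at a time
def pvDlast : Nat → List String → List String
  | 0, s => s
  | k + 1, s => pvDlast k s.dropLast

theorem pvDlast_concat (k : Nat) (s : List String) (x : String) :
    pvDlast (k + 1) (s ++ [x]) = pvDlast k s := by
  simp [pvDlast]

theorem pvAStep_foldl_concat (l : List (List (String × String))) (e : List (String × String)) :
    (l ++ [e]).foldl pvAStep [] = pvAStep (l.foldl pvAStep []) e := by
  simp [List.foldl_append]

theorem pvBLoop_eq (rl : List (List (String × String))) :
    ∀ (k : Nat) (out : List String),
      pvBLoop rl k out = out ++ (pvDlast k (rl.reverse.foldl pvAStep [])).reverse := by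
  induction rl with
  | nil =>
    intro k out
    have h : ∀ k : Nat, pvDlast k ([] : List String) = [] := by
      intro k; induction k with
      | zero => rfl
      | succ k' ih => simpa [pvDlast] using ih
    simp [pvBLoop, h]
  | cons e rest ih =>
    intro k out
    have hconcat : (e :: rest).reverse.foldl pvAStep [] =
        pvAStep (rest.reverse.foldl pvAStep []) e := by
      rw [List.reverse_cons, pvAStep_foldl_concat]
    set S := rest.reverse.foldl pvAStep [] with hS
    by_cases hig : ((PySem.Dict.mk e).getD "key" "") ∈ pvIgnoreKeys
    · rw [pvBLoop, if_pos hig, ih k out, hconcat, pvAStep, if_pos hig]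
    · by_cases hbs : ((PySem.Dict.mk e).getD "key" "") = "Backspace"
      · rw [pvBLoop, if_neg hig, if_pos hbs, ih (k + 1) out, hconcat, pvAStep,
          if_neg hig, if_pos hbs]
        have hdrop : (if S ≠ [] then S.dropLast else S) = S.dropLast := by
          by_cases h : S = [] <;> simp [h]
        rw [hdrop]
        rfl
      · rw [pvBLoop, if_neg hig, if_neg hbs]
        rcases k with _ | k'
        · rw [if_neg (by simp), ih 0 _, hconcat, pvAStep, if_neg hig, if_neg hbs]
          simp [pvDlast]
        · rw [if_pos (by simp), Nat.add_sub_cancel, ih k' out, hconcat, pvAStep, if_neg hig, if_neg hbs]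
          rw [pvDlast_concat]

theorem pvDlast_nil (s : List String) : pvDlast 0 s = s := rfl

-- ===== VERDICT (by name: the statement is the Claim_ definition above) =====
theorem process_key_events_spec : Claim_equal_process_key_events := by
  intro events _
  unfold Spec_process_key_events process_key_events process_key_events_alt
  rw [pvBLoop_eq events.reverse 0 [], List.reverse_reverse, pvDlast_nil]
  simp
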